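-- pv_equiv track=rewrite | github.com/ericmerle3789/Collatz-Junction-Theorem | scripts/tools/session10f26d_order_bounds.py | smooth_part
-- ===== SOURCE A (Python) =====
-- def smooth_part(n, B):
--     """Calcule la partie B-smooth de n."""
--     M = 1
--     temp = n
--     p = 2
--     while p <= B:
--         while temp % p == 0:
--             M *= p
--             temp //= p
--         p += 1 if p == 2 else 2
--     return M, temp  # M = smooth part, temp = rough part
-- ===== SOURCE B (Python) =====
-- def smooth_part(n, B):
--     """Calcule la partie B-smooth de n (primoriel + pelage par gcd)."""
--     P = 1
--     k = 2
--     while k <= B: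
--         if _is_prime(k):
--             P *= k
--         k += 1
--     M = 1
--     temp = n
--     while True:
--         g = _gcd(temp, P)
--         if g == 1:
--             return M, temp
--         M *= g
--         temp //= g
--
-- def _is_prime(k):
--     d = 2
--     while d * d <= k:
--         if k % d == 0:
--             return False
--         d += 1
--     return True
--
-- def _gcd(a, b):
--     a, b = abs(a), abs(b)
--     while b:
--         a, b = b, a % b
--     return a
-- ===== Notes on version B (the rewrite author's own statement) =====
-- stated objective: alternative
-- what changed: B builds the primorial of all primes <= B once and then peels the smooth part off n by repeated gcd / exact-division steps (one exponent of every relevant prime per round), instead of A's per-candidate trial division with an odd-step counter.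
import Mathlib
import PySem

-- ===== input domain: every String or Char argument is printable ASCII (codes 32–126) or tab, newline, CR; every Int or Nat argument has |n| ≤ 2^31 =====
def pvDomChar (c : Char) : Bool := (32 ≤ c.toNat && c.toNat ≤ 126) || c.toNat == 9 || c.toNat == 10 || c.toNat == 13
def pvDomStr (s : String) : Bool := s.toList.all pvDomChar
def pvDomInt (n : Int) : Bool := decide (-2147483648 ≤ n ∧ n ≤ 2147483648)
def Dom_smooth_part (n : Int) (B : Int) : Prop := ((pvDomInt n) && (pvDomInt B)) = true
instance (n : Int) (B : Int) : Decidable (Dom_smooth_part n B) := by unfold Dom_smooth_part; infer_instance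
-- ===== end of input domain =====

-- B splits n into smooth and rough part with a primorial and repeated gcd peeling instead of
-- per-candidate trial division; alternative algorithm of similar cost (not claimed faster).

-- Exact division by a divisor g ≥ 2 of temp ≠ 0 strictly shrinks |temp| (termination of both loops).
theorem pv_shrink (temp g : Int) (hd : g ∣ temp) (ht : temp ≠ 0) (hg : 2 ≤ g) :
    (PySem.Int.floordiv temp g).natAbs < temp.natAbs := by
  have hmod : PySem.Int.mod temp g = 0 := (PySem.Int.mod_eq_zero_iff_dvd temp g).mpr hd
  have hq := PySem.Int.floordiv_mul_add_mod temp g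
  rw [hmod, add_zero] at hq
  have h1 : (PySem.Int.floordiv temp g).natAbs * g.natAbs = temp.natAbs := by
    rw [← Int.natAbs_mul, hq]
  have hq0 : (PySem.Int.floordiv temp g).natAbs ≠ 0 := by
    intro h0
    rw [h0, zero_mul] at h1
    exact ht (Int.natAbs_eq_zero.mp h1.symm)
  have hg2 : 2 ≤ g.natAbs := by omega
  nlinarith [h1, Nat.pos_of_ne_zero hq0]

theorem pv_dec_inner (p M temp : Int) (h : 2 ≤ p ∧ temp ≠ 0 ∧ PySem.Int.mod temp p = 0) :
    (PySem.Int.floordiv temp p).natAbs < temp.natAbs :=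
  pv_shrink temp p ((PySem.Int.mod_eq_zero_iff_dvd temp p).mp h.2.2) h.2.1 h.1

theorem pv_dec_outer (B p : Int) (h : p ≤ B) :
    (B + 1 - (p + if p = 2 then 1 else 2)).toNat < (B + 1 - p).toNat := by
  split <;> omega

theorem pv_dec_mod (a b : Int) (h : 0 < b) : (PySem.Int.mod a b).toNat < b.toNat := by
  have h1 := PySem.Int.mod_nonneg (b := b) a h
  have h2 := PySem.Int.mod_lt (b := b) a h
  omega

theorem pv_dec_isPrime (k d : Int) (h : d * d ≤ k) :
    (k + 2 - (d + 1)).toNat < (k + 2 - d).toNat := by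
  have hsq : 2 * d - 1 ≤ d * d := by nlinarith [sq_nonneg (d - 1)]
  have h0 : 0 ≤ d * d := mul_self_nonneg d
  set t := d * d
  omega

theorem pv_dec_prim (B k : Int) (h : k ≤ B) : (B + 1 - (k + 1)).toNat < (B + 1 - k).toNat := by
  omega

-- ===== PORT A =====
-- inner 'while temp % p == 0': the guards '2 ≤ p' and 'temp ≠ 0' only make the loop total
-- (they hold on every call A's outer loop makes when A terminates).
def innerA (p M temp : Int) : Int × Int :=
  if h : 2 ≤ p ∧ temp ≠ 0 ∧ PySem.Int.mod temp p = 0 then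
    innerA p (M * p) (PySem.Int.floordiv temp p)
  else (M, temp)
termination_by temp.natAbs
decreasing_by exact pv_dec_inner p M temp h

-- outer 'while p <= B' with 'p += 1 if p == 2 else 2'
def outerA (B p M temp : Int) : Int × Int :=
  if h : p ≤ B then
    outerA B (p + if p = 2 then 1 else 2) (innerA p M temp).1 (innerA p M temp).2
  else (M, temp)
termination_by (B + 1 - p).toNat
decreasing_by exact pv_dec_outer B p h

def smooth_part (n : Int) (B : Int) : Int × Int := outerA B 2 1 n

-- ===== PORT B =====
-- _gcd: 'a, b = abs(a), abs(b); while b: a, b = b, a % b; return a'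
-- (guard '0 < b' = Python's 'while b', since b stays nonnegative on every call made)
def gcdLoop (a b : Int) : Int :=
  if h : 0 < b then gcdLoop b (PySem.Int.mod a b) else a
termination_by b.toNat
decreasing_by exact pv_dec_mod a b h

def gcdB (a b : Int) : Int := gcdLoop |a| |b|

-- semantic value of gcdLoop / gcdB (cited by peelLoop's termination proof)
theorem gcdLoop_eq (a b : Int) (ha : 0 ≤ a) (hb : 0 ≤ b) :
    gcdLoop a b = (Int.gcd a b : Int) := by
  rw [gcdLoop]
  split_ifs with h
  · have hm1 : 0 ≤ PySem.Int.mod a b := PySem.Int.mod_nonneg a h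
    rw [gcdLoop_eq b (PySem.Int.mod a b) (le_of_lt h) hm1]
    rw [PySem.Int.mod_eq_emod_of_pos (a := a) h]
    have h0 : 0 ≤ a % b := Int.emod_nonneg a (by omega)
    have hnat : (a % b).natAbs = a.natAbs % b.natAbs := by
      zify
      push_cast
      rw [abs_of_nonneg h0, abs_of_nonneg ha, abs_of_nonneg (le_of_lt h)]
    simp only [Int.gcd]
    rw [hnat, Nat.gcd_comm b.natAbs, ← Nat.gcd_rec, Nat.gcd_comm b.natAbs a.natAbs]
  · have hb0 : b = 0 := by omega
    subst hb0
    simp only [Int.gcd, Int.natAbs_zero, Nat.gcd_zero_right]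
    omega
termination_by b.toNat
decreasing_by exact pv_dec_mod a b h

theorem gcdB_eq (a b : Int) : gcdB a b = (Int.gcd a b : Int) := by
  unfold gcdB
  rw [gcdLoop_eq _ _ (abs_nonneg a) (abs_nonneg b)]
  simp [Int.gcd, Int.natAbs_abs]

-- _is_prime: 'd = 2; while d * d <= k: if k % d == 0: return False; d += 1; return True'
def isPrimeLoop (k d : Int) : Bool :=
  if h : d * d ≤ k then
    if PySem.Int.mod k d = 0 then false else isPrimeLoop k (d + 1)
  else true
termination_by (k + 2 - d).toNat
decreasing_by exact pv_dec_isPrime k d h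

def isPrimeB (k : Int) : Bool := isPrimeLoop k 2

-- primorial loop: 'P = 1; k = 2; while k <= B: if _is_prime(k): P *= k; k += 1'
def primLoop (B k P : Int) : Int :=
  if h : k ≤ B then primLoop B (k + 1) (if isPrimeB k then P * k else P) else P
termination_by (B + 1 - k).toNat
decreasing_by exact pv_dec_prim B k h

theorem pv_dec_peel (P temp : Int) (h : temp ≠ 0 ∧ gcdB temp P ≠ 1) :
    (PySem.Int.floordiv temp (gcdB temp P)).natAbs < temp.natAbs := by
  have hg : gcdB temp P = (Int.gcd temp P : Int) := gcdB_eq temp P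
  have hdvd : gcdB temp P ∣ temp := by rw [hg]; exact Int.gcd_dvd_left temp P
  have hpos : Int.gcd temp P ≠ 0 := fun hc => h.1 ((Int.gcd_eq_zero_iff.mp hc).1)
  have h2 : 2 ≤ gcdB temp P := by
    have hne := h.2
    rw [hg] at hne ⊢
    omega
  exact pv_shrink temp _ hdvd h.1 h2

-- gcd-peeling loop: 'while True: g = _gcd(temp, P); if g == 1: return M, temp; M *= g; temp //= g'
-- (guard 'temp ≠ 0' only makes the loop total: temp never becomes 0 on admitted inputs)
def peelLoop (P M temp : Int) : Int × Int :=
  if h : temp ≠ 0 ∧ gcdB temp P ≠ 1 then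
    peelLoop P (M * gcdB temp P) (PySem.Int.floordiv temp (gcdB temp P))
  else (M, temp)
termination_by temp.natAbs
decreasing_by exact pv_dec_peel P temp h

def smooth_part_alt (n : Int) (B : Int) : Int × Int := peelLoop (primLoop B 2 1) 1 n

-- ===== PRECONDITION & SPEC =====
-- Pre_ excludes n = 0 with B ≥ 2: there A's inner loop (and B's gcd loop) never terminates
-- (0 % p == 0 forever), so A returns on exactly the admitted inputs.
def Pre_smooth_part (n : Int) (B : Int) : Prop := n ≠ 0 ∨ B < 2
instance (n : Int) (B : Int) : Decidable (Pre_smooth_part n B) := by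
  unfold Pre_smooth_part; infer_instance

def pvWitness_smooth_part : Int × Int := (360, 7)

def Spec_smooth_part (n : Int) (B : Int) (out : Int × Int) : Prop := out = smooth_part_alt n B
instance (n : Int) (B : Int) (out : Int × Int) : Decidable (Spec_smooth_part n B out) := by
  unfold Spec_smooth_part; infer_instance

-- ===== CLAIM (what is proved, stated in full; the proofs are below) =====
def Claim_equal_smooth_part : Prop :=
  ∀ (n : Int) (B : Int), Dom_smooth_part n B → Pre_smooth_part n B →
    Spec_smooth_part n B (smooth_part n B)

-- ===== LEMMAS AND PROOFS =====

theorem pv_prime_int (q : ℕ) (hq : q.Prime) : Prime (q : ℤ) := by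
  rw [Int.prime_iff_natAbs_prime]
  simpa using hq

theorem pv_cast_dvd (m : ℕ) (n : ℤ) : (↑m : ℤ) ∣ n ↔ m ∣ n.natAbs := by
  rw [← Int.natAbs_dvd_natAbs]
  simp

-- invariant of A's inner division loop
theorem innerA_spec (p M temp : Int) : 2 ≤ p → temp ≠ 0 → 0 < M →
    (innerA p M temp).1 * (innerA p M temp).2 = M * temp ∧
    0 < (innerA p M temp).1 ∧
    (innerA p M temp).2 ≠ 0 ∧
    (innerA p M temp).2 ∣ temp ∧
    ¬ (p ∣ (innerA p M temp).2) ∧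
    (∀ q : ℕ, q.Prime → (q : ℤ) ∣ (innerA p M temp).1 → ((q : ℤ) ∣ M ∨ (q : ℤ) ∣ p)) := by
  fun_induction innerA p M temp with
  | case1 M temp h ih =>
    intro hp ht hM
    obtain ⟨hp2, ht0, hmod⟩ := h
    have hdvd : p ∣ temp := (PySem.Int.mod_eq_zero_iff_dvd temp p).mp hmod
    have heq := PySem.Int.floordiv_mul_add_mod temp p
    rw [hmod, add_zero] at heq
    have ht' : PySem.Int.floordiv temp p ≠ 0 := by
      intro h0; rw [h0, zero_mul] at heq; exact ht heq.symm
    have hM' : 0 < M * p := by positivity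
    obtain ⟨e1, e2, e3, e4, e5, e6⟩ := ih hp ht' hM'
    refine ⟨?_, e2, e3, ?_, e5, ?_⟩
    · rw [e1, mul_assoc, mul_comm p (PySem.Int.floordiv temp p), heq]
    · exact dvd_trans e4 ⟨p, heq.symm⟩
    · intro q hq hd
      rcases e6 q hq hd with h' | h'
      · rcases (pv_prime_int q hq).2.2 M p h' with h'' | h''
        · exact Or.inl h''
        · exact Or.inr h''
      · exact Or.inr h'
  | case2 M temp h =>
    intro hp ht hM
    have hmod : PySem.Int.mod temp p ≠ 0 := by
      intro hc; exact h ⟨hp, ht, hc⟩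
    refine ⟨rfl, hM, ht, dvd_refl temp, ?_, fun q _ hd => Or.inl hd⟩
    intro hd
    exact hmod ((PySem.Int.mod_eq_zero_iff_dvd temp p).mpr hd)

-- invariant of A's outer candidate loop
theorem outerA_spec (B p M temp : Int) :
    (p = 2 ∨ (3 ≤ p ∧ p % 2 = 1)) → temp ≠ 0 → 0 < M →
    (∀ q : ℕ, q.Prime → (q : ℤ) ∣ M → (q : ℤ) ≤ B) →
    (∀ q : ℕ, q.Prime → (q : ℤ) < p → ¬ (q : ℤ) ∣ temp) →
    (outerA B p M temp).1 * (outerA B p M temp).2 = M * temp ∧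
    0 < (outerA B p M temp).1 ∧
    (outerA B p M temp).2 ≠ 0 ∧
    (∀ q : ℕ, q.Prime → (q : ℤ) ∣ (outerA B p M temp).1 → (q : ℤ) ≤ B) ∧
    (∀ q : ℕ, q.Prime → (q : ℤ) ≤ B → ¬ (q : ℤ) ∣ (outerA B p M temp).2) := by
  fun_induction outerA B p M temp with
  | case1 p M temp h ih =>
    intro hp ht hM hMd htd
    have hp2 : 2 ≤ p := by rcases hp with h' | h' <;> omega
    obtain ⟨e1, e2, e3, e4, e5, e6⟩ := innerA_spec p M temp hp2 ht hM
    have hp' : p + (if p = 2 then 1 else 2) = 2 ∨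
        (3 ≤ p + (if p = 2 then 1 else 2) ∧ (p + (if p = 2 then 1 else 2)) % 2 = 1) := by
      rcases hp with h' | h' <;> split_ifs with hif <;> omega
    have hMd' : ∀ q : ℕ, q.Prime → (q : ℤ) ∣ (innerA p M temp).1 → (q : ℤ) ≤ B := by
      intro q hq hd
      rcases e6 q hq hd with h' | h'
      · exact hMd q hq h'
      · have : (q : ℤ) ≤ p := Int.le_of_dvd (by omega) h'
        omega
    have htd' : ∀ q : ℕ, q.Prime → (q : ℤ) < p + (if p = 2 then 1 else 2) →
        ¬ (q : ℤ) ∣ (innerA p M temp).2 := by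
      intro q hq hlt hd
      by_cases hif : p = 2
      · rw [if_pos hif] at hlt
        by_cases hq_lt : (q : ℤ) < p
        · exact htd q hq hq_lt (dvd_trans hd e4)
        · have hqe : (q : ℤ) = p := by omega
          exact e5 (hqe ▸ hd)
      · rw [if_neg hif] at hlt
        have hodd : 3 ≤ p ∧ p % 2 = 1 := by
          rcases hp with h' | h'
          · exact absurd h' hif
          · exact h'
        by_cases hq_lt : (q : ℤ) < p
        · exact htd q hq hq_lt (dvd_trans hd e4)
        · by_cases hq_eq : (q : ℤ) = p
          · exact e5 (hq_eq ▸ hd)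
          · -- q = p + 1 is even and ≥ 4, contradicting q prime
            have h2dvd : 2 ∣ q := by
              have : (2 : ℤ) ∣ (q : ℤ) := by omega
              exact_mod_cast this
            have hq2 : q = 2 := (Nat.Prime.even_iff hq).mp (even_iff_two_dvd.mpr h2dvd)
            omega
    simp only [dite_eq_ite] at ih
    obtain ⟨f1, f2, f3, f4, f5⟩ := ih hp' e3 e2 hMd' htd'
    exact ⟨by rw [f1, e1], f2, f3, f4, f5⟩
  | case2 p M temp h =>
    intro hp ht hM hMd htd
    refine ⟨rfl, hM, ht, hMd, ?_⟩
    intro q hq hle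
    exact htd q hq (by omega)

-- the trial-division loop decides "no divisor e with d ≤ e and e*e ≤ k"
theorem isPrimeLoop_iff (k d : Int) : 2 ≤ d →
    (isPrimeLoop k d = true ↔ ∀ e : Int, d ≤ e → e * e ≤ k → ¬ (e ∣ k)) := by
  fun_induction isPrimeLoop k d with
  | case1 d h hmod =>
    intro hd
    simp only [Bool.false_eq_true, false_iff]
    push_neg
    exact ⟨d, le_refl d, h, (PySem.Int.mod_eq_zero_iff_dvd k d).mp hmod⟩
  | case2 d h hmod ih =>
    intro hd
    rw [ih (by omega)]
    constructor
    · intro hall e he hee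
      by_cases heq : e = d
      · subst heq
        intro hdk
        exact hmod ((PySem.Int.mod_eq_zero_iff_dvd k e).mpr hdk)
      · exact hall e (by omega) hee
    · intro hall e he hee
      exact hall e (by omega) hee
  | case3 d h =>
    intro hd
    simp only [true_iff]
    intro e he hee hdvd
    have : d * d ≤ e * e := by nlinarith
    omega

theorem isPrimeB_iff (k : Int) (hk : 2 ≤ k) : isPrimeB k = true ↔ Nat.Prime k.toNat := by
  unfold isPrimeB
  rw [isPrimeLoop_iff k 2 le_rfl, Nat.prime_def_le_sqrt]
  constructor
  · intro h
    refine ⟨by omega, ?_⟩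
    intro m hm hsq hdvd
    have h1 : m * m ≤ k.toNat := Nat.le_sqrt.mp hsq
    have h2 : ((m * m : ℕ) : ℤ) ≤ ((k.toNat : ℕ) : ℤ) := Nat.cast_le.mpr h1
    push_cast at h2
    have h3 : ((k.toNat : ℕ) : ℤ) = k := Int.toNat_of_nonneg (by omega)
    have hmm : (m : ℤ) * (m : ℤ) ≤ k := by
      push_cast at h3
      linarith
    have hcast : (↑m : ℤ) ∣ k := by
      rw [pv_cast_dvd]
      have hkn : k.natAbs = k.toNat := by omega
      rw [hkn]
      exact hdvd
    exact h (m : ℤ) (by exact_mod_cast hm) hmm hcast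
  · intro hh e he hee hdvd
    obtain ⟨h2, h⟩ := hh
    have hnn : 0 ≤ e * e := mul_self_nonneg e
    have hdn : e.toNat ∣ k.toNat := by
      have h5 := (pv_cast_dvd e.toNat k).mp (by rwa [Int.toNat_of_nonneg (by omega : (0:ℤ) ≤ e)])
      have hkn : k.natAbs = k.toNat := by omega
      rwa [hkn] at h5
    refine h e.toNat (by omega) ?_ hdn
    refine Nat.le_sqrt.mpr ?_
    have habs : e.toNat * e.toNat = (e * e).natAbs := by
      rw [Int.natAbs_mul]
      have hen : e.toNat = e.natAbs := by omega
      rw [hen]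
    rw [habs]
    generalize ht : e * e = t at hee hnn
    omega

-- the primorial loop's result is positive and divisible by exactly the primes in [k, B]
theorem primLoop_spec (B k P : Int) : 2 ≤ k → 0 < P →
    (∀ q : ℕ, q.Prime → ((q : ℤ) ∣ P ↔ ((q : ℤ) < k ∧ (q : ℤ) ≤ B))) →
    0 < primLoop B k P ∧
    (∀ q : ℕ, q.Prime → ((q : ℤ) ∣ primLoop B k P ↔ (q : ℤ) ≤ B)) := by
  fun_induction primLoop B k P with
  | case1 k P h ih =>
    intro hk hP hchar
    have hP' : 0 < (if isPrimeB k then P * k else P) := by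
      split_ifs <;> [positivity; exact hP]
    refine ih (by omega) hP' ?_
    intro q hq
    split_ifs with hprime
    · have hkp : Nat.Prime k.toNat := (isPrimeB_iff k hk).mp hprime
      constructor
      · intro hd
        rcases (pv_prime_int q hq).2.2 P k hd with h' | h'
        · have := (hchar q hq).mp h'
          omega
        · have hqk : q ∣ k.toNat := by
            have hkn : k.toNat = k.natAbs := by omega
            rw [hkn, ← pv_cast_dvd]
            exact h'
          have : q = k.toNat := (Nat.prime_dvd_prime_iff_eq hq hkp).mp hqk
          omega
      · intro ⟨hlt, hle⟩
        by_cases hqk : (q : ℤ) = k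
        · exact ⟨P, by rw [hqk]; ring⟩
        · exact dvd_mul_of_dvd_left ((hchar q hq).mpr ⟨by omega, hle⟩) k
    · have hknp : ¬ Nat.Prime k.toNat := fun hc =>
        hprime ((isPrimeB_iff k hk).mpr hc)
      rw [hchar q hq]
      constructor
      · intro h'
        omega
      · intro h'
        refine ⟨?_, h'.2⟩
        by_contra hc
        have hqk : q = k.toNat := by omega
        exact hknp (hqk ▸ hq)
  | case2 k P h =>
    intro hk hP hchar
    refine ⟨hP, ?_⟩
    intro q hq
    rw [hchar q hq]
    omega

-- invariant of B's gcd-peeling loop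
theorem peelLoop_spec (B P M temp : Int) : 0 < P →
    (∀ q : ℕ, q.Prime → ((q : ℤ) ∣ P ↔ (q : ℤ) ≤ B)) →
    temp ≠ 0 → 0 < M →
    (∀ q : ℕ, q.Prime → (q : ℤ) ∣ M → (q : ℤ) ≤ B) →
    (peelLoop P M temp).1 * (peelLoop P M temp).2 = M * temp ∧
    0 < (peelLoop P M temp).1 ∧
    (peelLoop P M temp).2 ≠ 0 ∧
    (∀ q : ℕ, q.Prime → (q : ℤ) ∣ (peelLoop P M temp).1 → (q : ℤ) ≤ B) ∧
    (∀ q : ℕ, q.Prime → (q : ℤ) ≤ B → ¬ (q : ℤ) ∣ (peelLoop P M temp).2) := by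
  fun_induction peelLoop P M temp with
  | case1 M temp h ih =>
    intro hP hPc ht hM hMd
    obtain ⟨ht0, hg1⟩ := h
    have hgeq : gcdB temp P = (Int.gcd temp P : Int) := gcdB_eq temp P
    have hgdvd : gcdB temp P ∣ temp := by rw [hgeq]; exact Int.gcd_dvd_left temp P
    have hgdvdP : gcdB temp P ∣ P := by rw [hgeq]; exact Int.gcd_dvd_right temp P
    have hgpos : Int.gcd temp P ≠ 0 := fun hc => ht ((Int.gcd_eq_zero_iff.mp hc).1)
    have hg2 : 2 ≤ gcdB temp P := by rw [hgeq] at hg1 ⊢; omega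
    have heq := PySem.Int.floordiv_mul_add_mod temp (gcdB temp P)
    rw [(PySem.Int.mod_eq_zero_iff_dvd temp (gcdB temp P)).mpr hgdvd, add_zero] at heq
    have ht' : PySem.Int.floordiv temp (gcdB temp P) ≠ 0 := by
      intro h0; rw [h0, zero_mul] at heq; exact ht heq.symm
    have hM' : 0 < M * gcdB temp P := by positivity
    have hMd' : ∀ q : ℕ, q.Prime → (q : ℤ) ∣ M * gcdB temp P → (q : ℤ) ≤ B := by
      intro q hq hd
      rcases (pv_prime_int q hq).2.2 M (gcdB temp P) hd with h' | h'
      · exact hMd q hq h'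
      · exact (hPc q hq).mp (dvd_trans h' hgdvdP)
    obtain ⟨f1, f2, f3, f4, f5⟩ := ih hP hPc ht' hM' hMd'
    refine ⟨?_, f2, f3, f4, f5⟩
    rw [f1, mul_assoc, mul_comm (gcdB temp P) (PySem.Int.floordiv temp (gcdB temp P)), heq]
  | case2 M temp h =>
    intro hP hPc ht hM hMd
    refine ⟨rfl, hM, ht, hMd, ?_⟩
    intro q hq hle hdvd
    have hdvd' : (q : ℤ) ∣ temp := hdvd
    have hg1 : gcdB temp P = 1 := by
      by_contra hc; exact h ⟨ht, hc⟩
    rw [gcdB_eq] at hg1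
    have hg1' : Int.gcd temp P = 1 := by omega
    have hnat : q ∣ Int.gcd temp P := by
      exact_mod_cast Int.dvd_gcd hdvd' ((hPc q hq).mpr hle)
    rw [hg1'] at hnat
    have := Nat.le_of_dvd one_pos hnat
    have := hq.two_le
    omega

-- uniqueness of the (smooth, rough) factorisation for n ≠ 0
theorem good_unique (B n M r M' r' : Int) (hn : n ≠ 0)
    (e : M * r = n) (hM : 0 < M)
    (hMd : ∀ q : ℕ, q.Prime → (q : ℤ) ∣ M → (q : ℤ) ≤ B)
    (hr : ∀ q : ℕ, q.Prime → (q : ℤ) ≤ B → ¬ (q : ℤ) ∣ r)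
    (e' : M' * r' = n) (hM' : 0 < M')
    (hMd' : ∀ q : ℕ, q.Prime → (q : ℤ) ∣ M' → (q : ℤ) ≤ B)
    (hr' : ∀ q : ℕ, q.Prime → (q : ℤ) ≤ B → ¬ (q : ℤ) ∣ r') :
    M = M' ∧ r = r' := by
  have hco : ∀ (A C : Int), 0 < A →
      (∀ q : ℕ, q.Prime → (q : ℤ) ∣ A → (q : ℤ) ≤ B) →
      (∀ q : ℕ, q.Prime → (q : ℤ) ≤ B → ¬ (q : ℤ) ∣ C) →
      Nat.Coprime A.natAbs C.natAbs := by
    intro A C hA hAd hC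
    by_contra hc
    obtain ⟨q, hq, hqa, hqc⟩ := (Nat.Prime.not_coprime_iff_dvd).mp hc
    have h1 : (q : ℤ) ∣ A := (pv_cast_dvd q A).mpr hqa
    have h2 : (q : ℤ) ∣ C := (pv_cast_dvd q C).mpr hqc
    exact hC q hq (hAd q hq h1) h2
  have co1 : Nat.Coprime M.natAbs r'.natAbs := hco M r' hM hMd hr'
  have co2 : Nat.Coprime M'.natAbs r.natAbs := hco M' r hM' hMd' hr
  have hnat : M.natAbs * r.natAbs = M'.natAbs * r'.natAbs := by
    rw [← Int.natAbs_mul, ← Int.natAbs_mul, e, e']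
  have d1 : M.natAbs ∣ M'.natAbs := by
    have : M.natAbs ∣ M'.natAbs * r'.natAbs := ⟨r.natAbs, hnat.symm⟩
    exact (Nat.Coprime.dvd_of_dvd_mul_right co1 this)
  have d2 : M'.natAbs ∣ M.natAbs := by
    have : M'.natAbs ∣ M.natAbs * r.natAbs := ⟨r'.natAbs, hnat⟩
    exact (Nat.Coprime.dvd_of_dvd_mul_right co2 this)
  have hMeq : M = M' := by
    have := Nat.dvd_antisymm d1 d2
    omega
  refine ⟨hMeq, ?_⟩
  have : M * r = M * r' := by rw [e, ← e', hMeq]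
  exact mul_left_cancel₀ (by omega) this

-- ===== VERDICT (by name: the statement is the Claim_ definition above) =====
theorem smooth_part_spec : Claim_equal_smooth_part := by
  unfold Claim_equal_smooth_part
  intro n B _ hpre
  unfold Spec_smooth_part
  by_cases hn : n = 0
  · -- then B < 2: A's loop and B's loops all exit immediately with (1, 0)
    have hB : B < 2 := by
      rcases hpre with h | h
      · exact absurd hn h
      · exact h
    subst hn
    have hA : smooth_part 0 B = (1, 0) := by
      unfold smooth_part
      rw [outerA]
      simp [show ¬ (2 : ℤ) ≤ B by omega]
    have hP : primLoop B 2 1 = 1 := by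
      rw [primLoop]
      simp [show ¬ (2 : ℤ) ≤ B by omega]
    have hBv : smooth_part_alt 0 B = (1, 0) := by
      unfold smooth_part_alt
      rw [hP, peelLoop]
      simp
    rw [hA, hBv]
  · -- main case: both sides satisfy the unique smooth/rough factorisation property
    have hA := outerA_spec B 2 1 n (Or.inl rfl) hn one_pos
      (fun q hq hd => absurd (Int.le_of_dvd one_pos hd) (by have := hq.two_le; omega))
      (fun q hq hlt => absurd hlt (by have := hq.two_le; omega))
    obtain ⟨hPpos, hPchar⟩ := primLoop_spec B 2 1 le_rfl one_pos
      (fun q hq => by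
        constructor
        · intro hd
          exact absurd (Int.le_of_dvd one_pos hd) (by have := hq.two_le; omega)
        · intro ⟨h1, _⟩
          exact absurd h1 (by have := hq.two_le; omega))
    have hB := peelLoop_spec B (primLoop B 2 1) 1 n hPpos hPchar hn one_pos
      (fun q hq hd => absurd (Int.le_of_dvd one_pos hd) (by have := hq.two_le; omega))
    obtain ⟨a1, a2, _, a4, a5⟩ := hA
    obtain ⟨b1, b2, _, b4, b5⟩ := hB
    rw [one_mul] at a1 b1
    have := good_unique B n (smooth_part n B).1 (smooth_part n B).2
      (smooth_part_alt n B).1 (smooth_part_alt n B).2 hn a1 a2 a4 a5 b1 b2 b4 b5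
    exact Prod.ext this.1 this.2
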